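-- pv_equiv track=rewrite | github.com/poseidon1998/standalone_py_script | utils/general.py | get_intervals
-- ===== SOURCE A (Python) =====
-- def get_intervals(seq,dx=3,max_skip=0):
--
--     if seq[0] < seq[-1]: # asc
--         dx=-dx
--     intervals = []
--     left = 0
--     ii = left
--
--     while ii + 1 < len(seq):
--         int_i = [seq[left]]
--         missing_i = []
--
--         while ii+1<len(seq):
--             cur = seq[ii]
--             nxt = seq[ii+1]
--
--             if cur-nxt==dx:
--                 int_i.append(nxt)
--                 ii+=1
--
--             else:
--                 if (cur-nxt)//dx <= max_skip+1:
--                     missing_i.extend([cur-m*dx for m in range(1,max_skip+1)])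
--                     int_i.append(nxt)
--                 else:
--                     break
--                 ii+=1
--
--         left = ii+1
--         ii = left
--         missing_i = list(set(missing_i)-set(int_i))
--         intervals.append((int_i,sorted(missing_i)))
--
--     return intervals,dx
-- ===== SOURCE B (Python) =====
-- def get_intervals(seq, dx=3, max_skip=0):
--     # Two-phase rewrite: first compute the cut positions, then build each
--     # segment from a slice; no mutable shared scan pointer.
--     if seq[0] < seq[-1]:  # asc
--         dx = -dx
--     n = len(seq)
--
--     def is_cut(i):
--         d = seq[i] - seq[i + 1]
--         return d != dx and d // dx > max_skip + 1
--
--     cuts = [i for i in range(n - 1) if is_cut(i)]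
--     starts = [0] + [c + 1 for c in cuts]
--     ends = cuts + [n - 1]
--
--     intervals = []
--     for s, e in zip(starts, ends):
--         if s >= n - 1:  # the scan never opens a segment at the final position
--             continue
--         int_i = seq[s:e + 1]
--         missing = []
--         for i in range(s, e):
--             if seq[i] - seq[i + 1] != dx:
--                 missing.extend(seq[i] - m * dx for m in range(1, max_skip + 1))
--         intervals.append((int_i, sorted(set(missing) - set(int_i))))
--     return intervals, dx
-- ===== Notes on version B (the rewrite author's own statement) =====
-- stated objective: alternative
-- what changed: A's nested while-loops sharing a restart pointer are replaced by a two-phase plan: one comprehension computes all cut positions, then each segment is built independently from a slice between consecutive cuts, with the missing values recomputed per segment.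
import Mathlib
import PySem

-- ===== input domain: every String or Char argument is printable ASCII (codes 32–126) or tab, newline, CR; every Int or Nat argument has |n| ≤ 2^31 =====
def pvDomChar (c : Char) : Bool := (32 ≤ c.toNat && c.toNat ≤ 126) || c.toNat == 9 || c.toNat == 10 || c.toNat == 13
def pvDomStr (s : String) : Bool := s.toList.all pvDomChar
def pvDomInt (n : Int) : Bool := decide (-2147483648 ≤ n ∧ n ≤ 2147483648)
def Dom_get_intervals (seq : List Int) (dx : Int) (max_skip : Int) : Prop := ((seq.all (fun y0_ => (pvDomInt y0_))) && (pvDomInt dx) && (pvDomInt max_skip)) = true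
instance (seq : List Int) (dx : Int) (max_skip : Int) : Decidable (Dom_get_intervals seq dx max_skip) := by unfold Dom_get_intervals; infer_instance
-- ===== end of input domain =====

-- B replaces A's nested whiles with a shared restart pointer by a two-phase plan
-- (compute all cut positions, then build each segment from a slice); objective: alternative.
-- ===== PORT A =====

-- inner `while` of A: scans from ii, appending to int_i / missing_i, until break or end.
-- fuel is a totality guard only (the loop advances ii below seq.length; fuel = seq.length suffices).
def innerA (seq : List Int) (dx maxsk : Int) :
    Nat → Nat → List Int → List Int → List Int × List Int × Nat
  | 0, ii, intI, missI => (intI, missI, ii)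
  | fuel+1, ii, intI, missI =>
    if ii + 1 < seq.length then
      let cur := seq.getD ii 0        -- seq[ii], in range
      let nxt := seq.getD (ii+1) 0    -- seq[ii+1], in range
      if cur - nxt = dx then
        innerA seq dx maxsk fuel (ii+1) (intI ++ [nxt]) missI
      else if PySem.Int.floordiv (cur - nxt) dx ≤ maxsk + 1 then
        innerA seq dx maxsk fuel (ii+1) (intI ++ [nxt])
          (missI ++ (PySem.List.pyRange 1 (maxsk+1) 1).map (fun m => cur - m * dx))
      else (intI, missI, ii)
    else (intI, missI, ii)

-- outer `while` of A; fuel is a totality guard (left strictly increases; fuel = seq.length suffices)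
def outerA (seq : List Int) (dx maxsk : Int) :
    Nat → Nat → List (List Int × List Int) → List (List Int × List Int)
  | 0, _, acc => acc
  | fuel+1, left, acc =>
    if left + 1 < seq.length then
      let r := innerA seq dx maxsk seq.length left [seq.getD left 0] []
      -- missing_i = list(set(missing_i)-set(int_i)); append (int_i, sorted(missing_i))
      let missing := PySem.List.sorted
        (PySem.Set.diff (PySem.Set.ofList r.2.1) (PySem.Set.ofList r.1)) (fun x => x) false
      outerA seq dx maxsk fuel (r.2.2 + 1) (acc ++ [(r.1, missing)])
    else acc

def get_intervals (seq : List Int) (dx : Int) (max_skip : Int) :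
    (List (List Int × List Int)) × Int :=
  match PySem.List.pyGet? seq 0, PySem.List.pyGet? seq (-1) with
  | some a, some b =>
      let dx := if a < b then -dx else dx
      (outerA seq dx max_skip seq.length 0 [], dx)
  | _, _ => ([], dx)   -- seq = []: Python raises IndexError; excluded by Pre_

-- ===== PORT B =====

-- is_cut(i) from Source B
def isCut (seq : List Int) (dx maxsk : Int) (i : Nat) : Bool :=
  let d := seq.getD i 0 - seq.getD (i+1) 0
  d ≠ dx && PySem.Int.floordiv d dx > maxsk + 1

-- the `for i in range(s, e)` missing-collection loop of Source B (range(s,e) = range' s (e-s): s ≤ e at every call)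
def segMissing (seq : List Int) (dx maxsk : Int) (s e : Nat) : List Int :=
  (List.range' s (e - s)).foldl
    (fun acc i =>
      if seq.getD i 0 - seq.getD (i+1) 0 ≠ dx then
        acc ++ (PySem.List.pyRange 1 (maxsk+1) 1).map (fun m => seq.getD i 0 - m * dx)
      else acc) []

-- body of Source B's `for s, e in zip(starts, ends)` loop
def segPiece (seq : List Int) (dx maxsk : Int) (n : Nat)
    (acc : List (List Int × List Int)) (p : Nat × Nat) : List (List Int × List Int) :=
  if p.1 < n - 1 then
    let intI := PySem.List.slice seq (some (p.1 : Int)) (some ((p.2 + 1 : Nat) : Int))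
    acc ++ [(intI, PySem.List.sorted
      (PySem.Set.diff (PySem.Set.ofList (segMissing seq dx maxsk p.1 p.2))
        (PySem.Set.ofList intI)) (fun x => x) false)]
  else acc   -- s >= n-1: continue

def get_intervals_alt (seq : List Int) (dx : Int) (max_skip : Int) :
    (List (List Int × List Int)) × Int :=
  match PySem.List.pyGet? seq 0 with
  | none => ([], dx)   -- seq = []: Python raises IndexError; excluded by Pre_
  | some a =>
    match PySem.List.pyGet? seq (-1) with
    | none => ([], dx)
    | some b =>
      let dx := if a < b then -dx else dx
      let n := seq.length
      let cuts := (List.range (n-1)).filter (isCut seq dx max_skip)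
      let starts := 0 :: cuts.map (· + 1)
      let ends := cuts ++ [n-1]
      ((starts.zip ends).foldl (segPiece seq dx max_skip n) [], dx)

-- ===== PRECONDITION & SPEC =====

-- Pre_ excludes exactly the inputs where the Python raises: the empty list (IndexError on seq[0])
-- and dx = 0 with two unequal neighbours (ZeroDivisionError at (cur-nxt)//dx).
def Pre_get_intervals (seq : List Int) (dx : Int) (max_skip : Int) : Prop :=
  seq ≠ [] ∧ (dx = 0 → ∀ i < seq.length - 1, seq.getD i 0 = seq.getD (i+1) 0)
instance (seq : List Int) (dx : Int) (max_skip : Int) :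
    Decidable (Pre_get_intervals seq dx max_skip) := by
  unfold Pre_get_intervals; infer_instance

def pvWitness_get_intervals : List Int × Int × Int := ([9, 6, 3, 0], 3, 0)

def Spec_get_intervals (seq : List Int) (dx : Int) (max_skip : Int)
    (out : (List (List Int × List Int)) × Int) : Prop :=
  out = get_intervals_alt seq dx max_skip
instance (seq : List Int) (dx : Int) (max_skip : Int)
    (out : (List (List Int × List Int)) × Int) :
    Decidable (Spec_get_intervals seq dx max_skip out) := by
  unfold Spec_get_intervals; infer_instance

-- ===== CLAIM =====

def Claim_equal_get_intervals : Prop :=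
  ∀ (seq : List Int) (dx : Int) (max_skip : Int), Dom_get_intervals seq dx max_skip →
    Pre_get_intervals seq dx max_skip →
    Spec_get_intervals seq dx max_skip (get_intervals seq dx max_skip)

-- ===== LEMMAS AND PROOFS =====

-- EA fuel ii = A's inner-scan stopping index from ii (same fuel discipline as innerA)
def EA (seq : List Int) (dx maxsk : Int) : Nat → Nat → Nat
  | 0, ii => ii
  | fuel+1, ii =>
    if ii + 1 < seq.length then
      if isCut seq dx maxsk ii then ii else EA seq dx maxsk fuel (ii+1)
    else ii

theorem EA_ge (seq : List Int) (dx maxsk : Int) (fuel ii : Nat) :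
    ii ≤ EA seq dx maxsk fuel ii := by
  fun_induction EA seq dx maxsk fuel ii <;> omega

theorem EA_le (seq : List Int) (dx maxsk : Int) (fuel ii : Nat)
    (h : ii ≤ seq.length - 1) : EA seq dx maxsk fuel ii ≤ seq.length - 1 := by
  fun_induction EA seq dx maxsk fuel ii with
  | case1 => omega
  | case2 => omega
  | case3 fuel ii h hc ih => exact ih (by omega)
  | case4 => omega

theorem EA_no_cut (seq : List Int) (dx maxsk : Int) (fuel ii : Nat) :
    ∀ j, ii ≤ j → j < EA seq dx maxsk fuel ii → isCut seq dx maxsk j = false := by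
  fun_induction EA seq dx maxsk fuel ii with
  | case1 => omega
  | case2 => omega
  | case3 fuel ii h hc ih =>
      intro j hj hj2
      rcases Nat.eq_or_lt_of_le hj with rfl | hlt
      · simpa using hc
      · exact ih j hlt hj2
  | case4 => omega

theorem EA_cut (seq : List Int) (dx maxsk : Int) (fuel ii : Nat)
    (hf : seq.length - 1 - ii ≤ fuel)
    (h : EA seq dx maxsk fuel ii + 1 < seq.length) :
    isCut seq dx maxsk (EA seq dx maxsk fuel ii) = true := by
  fun_induction EA seq dx maxsk fuel ii with
  | case1 ii => omega
  | case2 fuel ii h' hc => simpa using hc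
  | case3 fuel ii h' hc ih => exact ih (by omega) h
  | case4 fuel ii h' => omega

-- segMissing as a flatMap (Source B's loop, peelable)
theorem segMissing_eq (seq : List Int) (dx maxsk : Int) (s e : Nat) :
    segMissing seq dx maxsk s e =
      (List.range' s (e - s)).flatMap (fun i =>
        if seq.getD i 0 - seq.getD (i+1) 0 ≠ dx then
          (PySem.List.pyRange 1 (maxsk+1) 1).map (fun m => seq.getD i 0 - m * dx)
        else []) := by
  unfold segMissing
  rw [show (fun (acc : List Int) i =>
      if seq.getD i 0 - seq.getD (i+1) 0 ≠ dx then
        acc ++ (PySem.List.pyRange 1 (maxsk+1) 1).map (fun m => seq.getD i 0 - m * dx)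
      else acc) = fun acc i => acc ++
        (if seq.getD i 0 - seq.getD (i+1) 0 ≠ dx then
          (PySem.List.pyRange 1 (maxsk+1) 1).map (fun m => seq.getD i 0 - m * dx)
        else []) from by funext acc i; split <;> simp]
  rw [PySem.List.foldl_append_eq_flatMap]
  simp

-- the interval list of the segment [s, e]
def segInt (seq : List Int) (s e : Nat) : List Int :=
  (List.range' s (e + 1 - s)).map (fun j => seq.getD j 0)

def segOut (seq : List Int) (dx maxsk : Int) (s e : Nat) : List Int × List Int :=
  (segInt seq s e, PySem.List.sorted
    (PySem.Set.diff (PySem.Set.ofList (segMissing seq dx maxsk s e))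
      (PySem.Set.ofList (segInt seq s e))) (fun x => x) false)

-- A's inner loop computes exactly the segment [ii, EA fuel ii]
theorem innerA_spec (seq : List Int) (dx maxsk : Int) (fuel ii : Nat)
    (intI missI : List Int) :
    innerA seq dx maxsk fuel ii intI missI =
      (intI ++ (List.range' (ii+1) (EA seq dx maxsk fuel ii - ii)).map
        (fun j => seq.getD j 0),
       missI ++ segMissing seq dx maxsk ii (EA seq dx maxsk fuel ii),
       EA seq dx maxsk fuel ii) := by
  fun_induction innerA seq dx maxsk fuel ii intI missI with
  | case1 ii intI missI =>
      simp [EA, segMissing_eq]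
  | case2 fuel ii intI missI h cur nxt hd ih =>
      have hd' : seq.getD ii 0 - seq.getD (ii+1) 0 = dx := hd
      have hc : isCut seq dx maxsk ii = false := by
        simp [isCut, List.getD] at hd' ⊢
        intro hx
        exact absurd hd' hx
      have hE : EA seq dx maxsk (fuel+1) ii = EA seq dx maxsk fuel (ii+1) := by
        rw [EA]; simp [h, hc]
      have hge : ii + 1 ≤ EA seq dx maxsk fuel (ii+1) := EA_ge seq dx maxsk fuel (ii+1)
      rw [ih, hE]
      rw [segMissing_eq, segMissing_eq]
      have hA : List.range' (ii+1) (EA seq dx maxsk fuel (ii+1) - ii) =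
          (ii+1) :: List.range' (ii+1+1) (EA seq dx maxsk fuel (ii+1) - (ii+1)) := by
        rw [show EA seq dx maxsk fuel (ii+1) - ii =
          (EA seq dx maxsk fuel (ii+1) - (ii+1)) + 1 by omega, List.range'_succ]
      have hB : List.range' ii (EA seq dx maxsk fuel (ii+1) - ii) =
          ii :: List.range' (ii+1) (EA seq dx maxsk fuel (ii+1) - (ii+1)) := by
        rw [show EA seq dx maxsk fuel (ii+1) - ii =
          (EA seq dx maxsk fuel (ii+1) - (ii+1)) + 1 by omega, List.range'_succ]
      rw [hA, hB]
      simp only [List.flatMap_cons, List.map_cons]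
      rw [if_neg (by simp [List.getD] at hd' ⊢; exact hd')]
      simp [List.getD]
      rfl
  | case3 fuel ii intI missI h cur nxt hd hf ih =>
      have hd' : ¬ (seq.getD ii 0 - seq.getD (ii+1) 0 = dx) := hd
      have hf' : PySem.Int.floordiv (seq.getD ii 0 - seq.getD (ii+1) 0) dx ≤ maxsk + 1 := hf
      have hc : isCut seq dx maxsk ii = false := by
        simp [isCut, List.getD] at hd' hf' ⊢
        intro _
        omega
      have hE : EA seq dx maxsk (fuel+1) ii = EA seq dx maxsk fuel (ii+1) := by
        rw [EA]; simp [h, hc]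
      have hge : ii + 1 ≤ EA seq dx maxsk fuel (ii+1) := EA_ge seq dx maxsk fuel (ii+1)
      rw [ih, hE]
      rw [segMissing_eq, segMissing_eq]
      have hA : List.range' (ii+1) (EA seq dx maxsk fuel (ii+1) - ii) =
          (ii+1) :: List.range' (ii+1+1) (EA seq dx maxsk fuel (ii+1) - (ii+1)) := by
        rw [show EA seq dx maxsk fuel (ii+1) - ii =
          (EA seq dx maxsk fuel (ii+1) - (ii+1)) + 1 by omega, List.range'_succ]
      have hB : List.range' ii (EA seq dx maxsk fuel (ii+1) - ii) =
          ii :: List.range' (ii+1) (EA seq dx maxsk fuel (ii+1) - (ii+1)) := by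
        rw [show EA seq dx maxsk fuel (ii+1) - ii =
          (EA seq dx maxsk fuel (ii+1) - (ii+1)) + 1 by omega, List.range'_succ]
      rw [hA, hB]
      simp only [List.flatMap_cons, List.map_cons]
      rw [if_pos (by simp [List.getD] at hd' ⊢; exact hd')]
      simp [List.getD]
      first
      | rfl
      | exact ⟨rfl, fun _ _ _ => rfl⟩
  | case4 fuel ii intI missI h cur nxt hd hf =>
      have hd' : ¬ (seq.getD ii 0 - seq.getD (ii+1) 0 = dx) := hd
      have hf' : ¬ PySem.Int.floordiv (seq.getD ii 0 - seq.getD (ii+1) 0) dx ≤ maxsk + 1 := hf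
      have hc : isCut seq dx maxsk ii = true := by
        simp [isCut, List.getD] at hd' hf' ⊢
        exact ⟨hd', by omega⟩
      have hE : EA seq dx maxsk (fuel+1) ii = ii := by
        rw [EA]; simp [h, hc]
      rw [hE]
      simp [segMissing_eq]
  | case5 fuel ii intI missI h =>
      have hE : EA seq dx maxsk (fuel+1) ii = ii := by
        rw [EA]; simp [h]
      rw [hE]
      simp [segMissing_eq]

-- the chain of segments emitted from a given start (fuel matches outerA's)
def chainSegs (seq : List Int) (dx maxsk : Int) : Nat → Nat → List (List Int × List Int)
  | 0, _ => []
  | fuel+1, left =>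
    if left + 1 < seq.length then
      segOut seq dx maxsk left (EA seq dx maxsk seq.length left) ::
        chainSegs seq dx maxsk fuel (EA seq dx maxsk seq.length left + 1)
    else []

theorem chainSegs_out (seq : List Int) (dx maxsk : Int) (fuel left : Nat)
    (h : ¬ left + 1 < seq.length) : chainSegs seq dx maxsk fuel left = [] := by
  cases fuel with
  | zero => rfl
  | succ fuel => rw [chainSegs, if_neg h]

theorem outerA_spec (seq : List Int) (dx maxsk : Int) (fuel left : Nat)
    (acc : List (List Int × List Int)) :
    outerA seq dx maxsk fuel left acc = acc ++ chainSegs seq dx maxsk fuel left := by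
  fun_induction outerA seq dx maxsk fuel left acc with
  | case1 left acc =>
      simp [chainSegs]
  | case2 fuel left acc h r missing ih =>
      rw [chainSegs]
      simp only [h, if_true]
      have hr : r = (segInt seq left (EA seq dx maxsk seq.length left),
          segMissing seq dx maxsk left (EA seq dx maxsk seq.length left),
          EA seq dx maxsk seq.length left) := by
        have := innerA_spec seq dx maxsk seq.length left [seq.getD left 0] []
        rw [show r = innerA seq dx maxsk seq.length left [seq.getD left 0] [] from rfl, this]
        have hge := EA_ge seq dx maxsk seq.length left
        simp only [List.nil_append]
        congr 1
        unfold segInt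
        rw [show EA seq dx maxsk seq.length left + 1 - left =
          (EA seq dx maxsk seq.length left - left) + 1 by omega]
        rw [List.range'_succ]
        simp
      rw [ih]
      simp only [hr]
      simp [segOut, missing, hr]
  | case3 fuel left acc h =>
      rw [chainSegs, if_neg h]
      simp

-- cut positions at or after `left`
def cutsFrom (seq : List Int) (dx maxsk : Int) (left : Nat) : List Nat :=
  (List.range' left (seq.length - 1 - left)).filter (isCut seq dx maxsk)

theorem cutsFrom_eq (seq : List Int) (dx maxsk : Int) (left : Nat)
    (h : left ≤ seq.length - 1) :
    cutsFrom seq dx maxsk left =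
      if EA seq dx maxsk seq.length left + 1 < seq.length then
        EA seq dx maxsk seq.length left ::
          cutsFrom seq dx maxsk (EA seq dx maxsk seq.length left + 1)
      else [] := by
  have hge := EA_ge seq dx maxsk seq.length left
  have hle := EA_le seq dx maxsk seq.length left h
  have hsplit : List.range' left (seq.length - 1 - left) =
      List.range' left (EA seq dx maxsk seq.length left - left) ++
        List.range' (left + (EA seq dx maxsk seq.length left - left))
          (seq.length - 1 - EA seq dx maxsk seq.length left) := by
    rw [show seq.length - 1 - left = (EA seq dx maxsk seq.length left - left) +
        (seq.length - 1 - EA seq dx maxsk seq.length left) by omega]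
    have := List.range'_append (s := left) (m := EA seq dx maxsk seq.length left - left)
      (n := seq.length - 1 - EA seq dx maxsk seq.length left) (step := 1)
    simp only [one_mul] at this
    exact this.symm
  unfold cutsFrom
  rw [hsplit, List.filter_append]
  have h1 : (List.range' left (EA seq dx maxsk seq.length left - left)).filter
      (isCut seq dx maxsk) = [] := by
    rw [List.filter_eq_nil_iff]
    intro j hj
    rw [List.mem_range'] at hj
    obtain ⟨i, hi, rfl⟩ := hj
    simp only [one_mul, Bool.not_eq_true]
    exact EA_no_cut seq dx maxsk seq.length left (left + i) (by omega) (by omega)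
  rw [h1, List.nil_append]
  rw [show left + (EA seq dx maxsk seq.length left - left) =
    EA seq dx maxsk seq.length left by omega]
  split
  · next hcut =>
      rw [show seq.length - 1 - EA seq dx maxsk seq.length left =
          (seq.length - 1 - (EA seq dx maxsk seq.length left + 1)) + 1 by omega,
        List.range'_succ,
        List.filter_cons_of_pos
          (by simpa using EA_cut seq dx maxsk seq.length left (by omega) hcut)]
  · next hcut =>
      rw [show seq.length - 1 - EA seq dx maxsk seq.length left = 0 by omega]
      simp

-- the zip(starts, ends) fold of Source B builds the same chain of segments
theorem drop_take_eq_map_range (seq : List Int) (s k : Nat) (h : s + k ≤ seq.length) :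
    (seq.drop s).take k = (List.range' s k).map (fun j => seq.getD j 0) := by
  apply List.ext_getElem
  · rw [List.length_take, List.length_drop, List.length_map, List.length_range']
    omega
  · intro i h1 h2
    rw [List.length_take, List.length_drop] at h1
    simp only [List.getElem_take, List.getElem_drop, List.getElem_map, List.getElem_range',
      one_mul]
    rw [List.getD_eq_getElem?_getD, List.getElem?_eq_getElem (by omega)]
    simp

theorem slice_eq_segInt (seq : List Int) (s e : Nat) (hs : s ≤ e) (he : e < seq.length) :
    PySem.List.slice seq (some (s : Int)) (some ((e + 1 : Nat) : Int)) = segInt seq s e := by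
  rw [PySem.List.slice_natCast]
  unfold segInt
  exact drop_take_eq_map_range seq s (e + 1 - s) (by omega)

theorem segPiece_keep (seq : List Int) (dx maxsk : Int) (acc : List (List Int × List Int))
    (s e : Nat) (hs : s ≤ e) (he : e ≤ seq.length - 1) (hn : s < seq.length - 1) :
    segPiece seq dx maxsk seq.length acc (s, e) = acc ++ [segOut seq dx maxsk s e] := by
  unfold segPiece segOut
  rw [if_pos (by simpa using hn)]
  rw [slice_eq_segInt seq s e hs (by omega)]

theorem zipfold_spec (seq : List Int) (dx maxsk : Int) :
    ∀ (fuel left : Nat) (acc : List (List Int × List Int)),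
      seq.length - 1 - left ≤ fuel → left ≤ seq.length - 1 →
      ((left :: (cutsFrom seq dx maxsk left).map (· + 1)).zip
          (cutsFrom seq dx maxsk left ++ [seq.length - 1])).foldl
        (segPiece seq dx maxsk seq.length) acc =
      acc ++ chainSegs seq dx maxsk fuel left := by
  intro fuel
  induction fuel with
  | zero =>
      intro left acc hk h
      have hge := EA_ge seq dx maxsk seq.length left
      have hle := EA_le seq dx maxsk seq.length left h
      rw [cutsFrom_eq seq dx maxsk left h, if_neg (by omega)]
      rw [chainSegs_out seq dx maxsk 0 left (by omega)]
      simp only [List.map_nil, List.nil_append, List.zip_cons_cons, List.zip_nil_left,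
        List.foldl_cons, List.foldl_nil]
      unfold segPiece
      rw [if_neg (by simp; omega)]
      simp
  | succ fuel ih =>
      intro left acc hk h
      have hge := EA_ge seq dx maxsk seq.length left
      have hle := EA_le seq dx maxsk seq.length left h
      rw [cutsFrom_eq seq dx maxsk left h]
      by_cases hcut : EA seq dx maxsk seq.length left + 1 < seq.length
      · rw [if_pos hcut]
        simp only [List.map_cons, List.cons_append, List.zip_cons_cons, List.foldl_cons]
        rw [segPiece_keep seq dx maxsk acc left (EA seq dx maxsk seq.length left) hge hle
          (by omega)]
        have hk2 : seq.length - 1 - (EA seq dx maxsk seq.length left + 1) ≤ fuel := by omega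
        have hb2 : EA seq dx maxsk seq.length left + 1 ≤ seq.length - 1 := by omega
        rw [ih (EA seq dx maxsk seq.length left + 1) (acc ++ [segOut seq dx maxsk left
          (EA seq dx maxsk seq.length left)]) hk2 hb2]
        rw [chainSegs, if_pos (show left + 1 < seq.length by omega)]
        simp
      · rw [if_neg hcut]
        simp only [List.map_nil, List.nil_append, List.zip_cons_cons, List.zip_nil_left,
          List.foldl_cons, List.foldl_nil]
        rw [chainSegs]
        by_cases hl : left + 1 < seq.length
        · rw [if_pos hl]
          have hE1 : EA seq dx maxsk seq.length left = seq.length - 1 := by omega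
          rw [chainSegs_out seq dx maxsk fuel (EA seq dx maxsk seq.length left + 1)
            (by omega)]
          rw [segPiece_keep seq dx maxsk acc left (seq.length - 1) (by omega) (by omega)
            (by omega), hE1]
        · rw [if_neg hl]
          unfold segPiece
          rw [if_neg (by simp; omega)]
          simp

-- ===== VERDICT =====

theorem get_intervals_spec : Claim_equal_get_intervals := by
  unfold Claim_equal_get_intervals
  intro seq dx max_skip hdom hpre
  obtain ⟨hne, -⟩ := hpre
  unfold Spec_get_intervals get_intervals get_intervals_alt
  have hlen : 1 ≤ seq.length := by
    cases seq with
    | nil => exact absurd rfl hne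
    | cons a t => simp
  cases h0 : PySem.List.pyGet? seq 0 with
  | none => rfl
  | some a =>
    cases h1 : PySem.List.pyGet? seq (-1) with
    | none => rfl
    | some b =>
      simp only
      congr 1
      rw [outerA_spec]
      rw [show (List.range (seq.length - 1)).filter
            (isCut seq (if a < b then -dx else dx) max_skip) =
          cutsFrom seq (if a < b then -dx else dx) max_skip 0 from by
        unfold cutsFrom
        rw [List.range_eq_range', Nat.sub_zero]]
      rw [zipfold_spec seq (if a < b then -dx else dx) max_skip seq.length 0 []
        (by omega) (by omega)]
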